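-- pv_equiv track=rewrite | github.com/underline83/trgb | app/services/carta_vini_service.py | build_carta_toc_html
-- ===== SOURCE A (Python) =====
-- from itertools import groupby
-- from typing import Iterable, Dict, Any
--
-- def resolve_regione(r: Dict[str, Any]) -> str:
--     """Regola base: Regione → Nazione → Varie."""
--     if r.get("REGIONE"):
--         return r["REGIONE"]
--     if r.get("NAZIONE"):
--         return r["NAZIONE"]
--     return "Varie"
--
-- def build_carta_toc_html(rows: Iterable[Dict[str, Any]]) -> str:
--     rows = list(rows)
--     if not rows:
--         return ""
--
--     def k_tip(r): return r["TIPOLOGIA"] or "Senza tipologia"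
--     def k_naz(r): return r.get("NAZIONE") or "Varie"
--     def k_reg(r): return resolve_regione(r)
--
--     html = [
--         "<div class='toc-page'>",
--         "<div class='toc-title'>INDICE</div>"
--     ]
--
--     for tip, g1 in groupby(rows, k_tip):
--         g1 = list(g1)
--         html.append(f"<div class='toc-tipologia'>{tip}</div>")
--
--         for naz, g1b in groupby(g1, k_naz):
--             g1b = list(g1b)
--             html.append(f"<div class='toc-nazione'>· {naz}</div>")
--
--             seen = set()
--             for reg, g2 in groupby(g1b, k_reg):
--                 g2 = list(g2)
--                 if reg not in seen:
--                     seen.add(reg)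
--                     html.append(f"<div class='toc-regione'>&nbsp;&nbsp;— {reg}</div>")
--
--         html.append("<div class='toc-spacer'></div>")
--
--     html.append("</div>")
--     return "".join(html)
-- ===== SOURCE B (Python) =====
-- def resolve_regione(r):
--     """Regola base: Regione -> Nazione -> Varie."""
--     if r.get("REGIONE"):
--         return r["REGIONE"]
--     if r.get("NAZIONE"):
--         return r["NAZIONE"]
--     return "Varie"
--
-- def build_carta_toc_html(rows):
--     rows = list(rows)
--     if not rows:
--         return ""
--     parts = [
--         "<div class='toc-page'>",
--         "<div class='toc-title'>INDICE</div>",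
--     ]
--     prev_tip = None
--     prev_naz = None
--     seen = set()
--     for r in rows:
--         tip = r["TIPOLOGIA"] or "Senza tipologia"
--         naz = r.get("NAZIONE") or "Varie"
--         reg = resolve_regione(r)
--         if tip != prev_tip:
--             if prev_tip is not None:
--                 parts.append("<div class='toc-spacer'></div>")
--             parts.append(f"<div class='toc-tipologia'>{tip}</div>")
--             prev_tip = tip
--             prev_naz = None
--         if naz != prev_naz:
--             parts.append(f"<div class='toc-nazione'>· {naz}</div>")
--             prev_naz = naz
--             seen = set()
--         if reg not in seen:
--             seen.add(reg)
--             parts.append(f"<div class='toc-regione'>&nbsp;&nbsp;— {reg}</div>")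
--     parts.append("<div class='toc-spacer'></div>")
--     parts.append("</div>")
--     return "".join(parts)
-- ===== Notes on version B (the rewrite author's own statement) =====
-- stated objective: simpler
-- what changed: Replaces the three nested itertools.groupby loops with one flat pass over the rows that tracks prev_tip/prev_naz (None sentinels) and a per-nazione seen set, emitting the spacer before each new tipologia plus one final spacer instead of after each group.
import Mathlib
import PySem

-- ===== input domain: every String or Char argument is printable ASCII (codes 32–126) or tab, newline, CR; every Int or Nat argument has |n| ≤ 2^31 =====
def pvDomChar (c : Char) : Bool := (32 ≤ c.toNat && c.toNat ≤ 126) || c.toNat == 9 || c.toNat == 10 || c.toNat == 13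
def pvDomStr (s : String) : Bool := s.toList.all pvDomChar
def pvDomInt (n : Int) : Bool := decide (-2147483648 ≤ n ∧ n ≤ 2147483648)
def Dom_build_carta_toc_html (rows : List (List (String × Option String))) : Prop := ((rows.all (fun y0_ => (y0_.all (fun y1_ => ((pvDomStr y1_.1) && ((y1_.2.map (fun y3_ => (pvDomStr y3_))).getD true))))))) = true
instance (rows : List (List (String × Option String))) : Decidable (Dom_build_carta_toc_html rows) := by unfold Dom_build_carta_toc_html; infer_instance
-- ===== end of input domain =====

-- B replaces A's three nested itertools.groupby loops by one flat pass with prev_tip/prev_naz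
-- trackers and a per-nazione seen set (objective: simpler); same return value on Pre_.

-- ===== PORT A =====
-- shared helpers: the module's resolve_regione and the truthiness of `r.get(k)` ("" and None are falsy)
def pvTruthy (o : Option (Option String)) : Option String :=
  match o.join with
  | some s => if s = "" then none else some s
  | none => none

def resolve_regione (r : List (String × Option String)) : String :=
  match pvTruthy ((PySem.Dict.mk r).get? "REGIONE") with
  | some s => s
  | none =>
    match pvTruthy ((PySem.Dict.mk r).get? "NAZIONE") with
    | some s => s
    | none => "Varie"

-- k_tip: `r["TIPOLOGIA"] or "Senza tipologia"`; on a row without the key Python raises KeyError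
-- (excluded by Pre_ below; there this port just falls back to the `or` default).
def pvKTip (r : List (String × Option String)) : String :=
  match pvTruthy ((PySem.Dict.mk r).get? "TIPOLOGIA") with
  | some s => s
  | none => "Senza tipologia"

def pvKNaz (r : List (String × Option String)) : String :=
  match pvTruthy ((PySem.Dict.mk r).get? "NAZIONE") with
  | some s => s
  | none => "Varie"

def pvSpacer : String := "<div class='toc-spacer'></div>"
def pvTipDiv (t : String) : String := "<div class='toc-tipologia'>" ++ t ++ "</div>"
def pvNazDiv (n : String) : String := "<div class='toc-nazione'>· " ++ n ++ "</div>"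
def pvRegDiv (g : String) : String := "<div class='toc-regione'>&nbsp;&nbsp;— " ++ g ++ "</div>"
def pvHeader : List String := ["<div class='toc-page'>", "<div class='toc-title'>INDICE</div>"]

-- itertools.groupby(xs, key) with each group materialized: consecutive runs of equal key
def pyGroupby (key : List (String × Option String) → String) :
    List (List (String × Option String)) → List (String × List (List (String × Option String)))
  | [] => []
  | x :: xs =>
    (key x, x :: xs.takeWhile (fun y => key y == key x)) ::
      pyGroupby key (xs.dropWhile (fun y => key y == key x))
  termination_by l => l.length
  decreasing_by
    simpa using Nat.lt_succ_of_le (List.length_dropWhile_le _ _)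

-- the innermost loop of A: `if reg not in seen: seen.add(reg); html.append(...)`
def aRegStep (st : List String × PySem.Set String)
    (kg : String × List (List (String × Option String))) : List String × PySem.Set String :=
  if kg.1 ∈ st.2 then st
  else (st.1 ++ [pvRegDiv kg.1], PySem.Set.add st.2 kg.1)

-- A's middle loop over groupby(g1, k_naz), with a fresh `seen` per nazione group
def aNazLoop (acc : List String) (g1 : List (List (String × Option String))) : List String :=
  (pyGroupby pvKNaz g1).foldl
    (fun acc ng =>
      ((pyGroupby resolve_regione ng.2).foldl aRegStep
        (acc ++ [pvNazDiv ng.1], PySem.Set.ofList [])).1)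
    acc

def build_carta_toc_html (rows : List (List (String × Option String))) : String :=
  if rows = [] then "" else
  let html := pvHeader
  let html := (pyGroupby pvKTip rows).foldl
    (fun acc tg => aNazLoop (acc ++ [pvTipDiv tg.1]) tg.2 ++ [pvSpacer]) html
  PySem.Str.join "" (html ++ ["</div>"])

-- ===== PORT B =====
-- one flat pass: state = (parts, prev_tip, prev_naz, seen)
def bStep (st : List String × Option String × Option String × PySem.Set String)
    (r : List (String × Option String)) :
    List String × Option String × Option String × PySem.Set String :=
  match st with
  | (parts, prevTip, prevNaz, seen) =>
    let tip := pvKTip r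
    let naz := pvKNaz r
    let reg := resolve_regione r
    match (if some tip ≠ prevTip then
            ((if prevTip = none then parts else parts ++ [pvSpacer]) ++ [pvTipDiv tip],
              some tip, (none : Option String))
          else (parts, prevTip, prevNaz) :
          List String × Option String × Option String) with
    | (parts, prevTip, prevNaz) =>
      match (if some naz ≠ prevNaz then
              (parts ++ [pvNazDiv naz], some naz, (PySem.Set.ofList [] : PySem.Set String))
            else (parts, prevNaz, seen) :
            List String × Option String × PySem.Set String) with
      | (parts, prevNaz, seen) =>
        if reg ∈ seen then (parts, prevTip, prevNaz, seen)
        else (parts ++ [pvRegDiv reg], prevTip, prevNaz, PySem.Set.add seen reg)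

def build_carta_toc_html_alt (rows : List (List (String × Option String))) : String :=
  if rows = [] then "" else
  let st := rows.foldl bStep (pvHeader, none, none, PySem.Set.ofList [])
  PySem.Str.join "" (st.1 ++ [pvSpacer, "</div>"])

-- ===== PRECONDITION & SPEC =====
-- Pre_ excludes exactly the rows without a "TIPOLOGIA" key, on which A's r["TIPOLOGIA"] raises KeyError.
def Pre_build_carta_toc_html (rows : List (List (String × Option String))) : Prop :=
  (rows.all (fun r => ((PySem.Dict.mk r).get? "TIPOLOGIA").isSome)) = true
instance (rows : List (List (String × Option String))) : Decidable (Pre_build_carta_toc_html rows) := by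
  unfold Pre_build_carta_toc_html; infer_instance

def pvWitness_build_carta_toc_html : (List (List (String × Option String))) :=
  [[("TIPOLOGIA", some "Rossi"), ("NAZIONE", some "Italia"), ("REGIONE", some "Piemonte")],
   [("TIPOLOGIA", some "Rossi"), ("NAZIONE", some "Italia"), ("REGIONE", none)]]

def Spec_build_carta_toc_html (rows : List (List (String × Option String))) (out : String) : Prop := out = build_carta_toc_html_alt rows
instance (rows : List (List (String × Option String))) (out : String) : Decidable (Spec_build_carta_toc_html rows out) := by unfold Spec_build_carta_toc_html; infer_instance

-- ===== CLAIM (what is proved, stated in full; the proofs are below) =====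
def Claim_equal_build_carta_toc_html : Prop := ∀ (rows : List (List (String × Option String))), Dom_build_carta_toc_html rows → Pre_build_carta_toc_html rows → Spec_build_carta_toc_html rows (build_carta_toc_html rows)

-- ===== LEMMAS AND PROOFS =====

-- element-wise dedup fold on regioni (the normal form both reg-levels reduce to)
def elemDedup (st : List String × PySem.Set String)
    (h : List (List (String × Option String))) : List String × PySem.Set String :=
  h.foldl (fun st r =>
    if resolve_regione r ∈ st.2 then st
    else (st.1 ++ [pvRegDiv (resolve_regione r)], PySem.Set.add st.2 (resolve_regione r))) st

-- the parts B emits over a list of tipologia runs, given the previous tipologia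
def tipRunsParts : Option String → List (String × List (List (String × Option String))) → List String
  | _, [] => []
  | pt, (t, g) :: rest =>
    ((if pt = none then [] else [pvSpacer]) ++ (pvTipDiv t :: aNazLoop [] g)) ++
      tipRunsParts (some t) rest

lemma dedup_append (h : List (List (String × Option String))) :
    ∀ p s, elemDedup (p, s) h = (p ++ (elemDedup ([], s) h).1, (elemDedup ([], s) h).2) := by
  induction h with
  | nil => intro p s; simp [elemDedup]
  | cons x xs ih =>
    intro p s
    simp only [elemDedup, List.foldl_cons] at *
    by_cases hx : resolve_regione x ∈ s
    · simp only [if_pos hx]; exact ih p s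
    · simp only [if_neg hx, List.nil_append]
      rw [ih (p ++ [pvRegDiv (resolve_regione x)]) _, ih [pvRegDiv (resolve_regione x)] _]
      simp

lemma dedup_seen (h : List (List (String × Option String))) (p : List String) (s : PySem.Set String)
    (k : String) (hk : ∀ r ∈ h, resolve_regione r = k) (hs : k ∈ s) :
    elemDedup (p, s) h = (p, s) := by
  induction h with
  | nil => rfl
  | cons x xs ih =>
    simp only [elemDedup, List.foldl_cons]
    rw [hk x (by simp), if_pos hs]
    exact ih (fun r hr => hk r (by simp [hr]))

lemma mem_takeWhile_key (key : List (String × Option String) → String)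
    (x : List (String × Option String)) (xs : List (List (String × Option String))) :
    ∀ r ∈ xs.takeWhile (fun y => key y == key x), key r = key x := by
  intro r hr
  have := List.mem_takeWhile_imp hr
  simpa using this

lemma dropWhile_key_head (key : List (String × Option String) → String)
    (x y : List (String × Option String)) (xs ys : List (List (String × Option String)))
    (h : xs.dropWhile (fun y => key y == key x) = y :: ys) : key y ≠ key x := by
  induction xs with
  | nil => simp at h
  | cons a as ih =>
    rw [List.dropWhile_cons] at h
    by_cases hpa : (key a == key x) = true
    · rw [if_pos hpa] at h; exact ih h
    · rw [if_neg hpa] at h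
      injection h with h1 _
      subst h1
      simp at hpa
      exact hpa

lemma mem_add_self (s : PySem.Set String) (k : String) : k ∈ PySem.Set.add s k := by
  by_cases h : k ∈ s
  · simp [h]
  · simp [PySem.Set.mem_add]

lemma reg_loop_eq (h : List (List (String × Option String))) :
    ∀ st, (pyGroupby resolve_regione h).foldl aRegStep st = elemDedup st h := by
  induction h using pyGroupby.induct resolve_regione with
  | case1 => intro st; rw [pyGroupby]; rfl
  | case2 x xs ih =>
    intro st
    obtain ⟨p, s⟩ := st
    rw [pyGroupby]
    simp only [List.foldl_cons]
    rw [ih]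
    have hsplit : x :: xs =
        (x :: xs.takeWhile (fun y => resolve_regione y == resolve_regione x)) ++
          xs.dropWhile (fun y => resolve_regione y == resolve_regione x) := by
      simp [List.takeWhile_append_dropWhile]
    conv_rhs => rw [hsplit]
    rw [show ∀ (a b : List (List (String × Option String))) st,
          elemDedup st (a ++ b) = elemDedup (elemDedup st a) b from
        fun a b st => List.foldl_append ..]
    congr 1
    have htw := mem_takeWhile_key resolve_regione x xs
    by_cases hx : resolve_regione x ∈ s
    · simp only [aRegStep, elemDedup, List.foldl_cons, if_pos hx]
      exact (dedup_seen _ _ _ _ htw hx).symm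
    · simp only [aRegStep, elemDedup, List.foldl_cons, if_neg hx]
      exact (dedup_seen _ _ _ _ htw (mem_add_self s _)).symm

lemma naz_step_append (acc : List String)
    (ng : String × List (List (String × Option String))) :
    ((pyGroupby resolve_regione ng.2).foldl aRegStep (acc ++ [pvNazDiv ng.1], PySem.Set.ofList [])).1
      = acc ++ ((pyGroupby resolve_regione ng.2).foldl aRegStep ([pvNazDiv ng.1], PySem.Set.ofList [])).1 := by
  rw [reg_loop_eq, reg_loop_eq]
  rw [dedup_append _ (acc ++ [pvNazDiv ng.1]) _, dedup_append _ [pvNazDiv ng.1] _]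
  simp

lemma nazfold_append (runs : List (String × List (List (String × Option String)))) :
    ∀ (p q : List String),
    runs.foldl (fun acc ng =>
        ((pyGroupby resolve_regione ng.2).foldl aRegStep
          (acc ++ [pvNazDiv ng.1], PySem.Set.ofList [])).1) (p ++ q)
      = p ++ runs.foldl (fun acc ng =>
        ((pyGroupby resolve_regione ng.2).foldl aRegStep
          (acc ++ [pvNazDiv ng.1], PySem.Set.ofList [])).1) q := by
  induction runs with
  | nil => intro p q; rfl
  | cons ng rest ih =>
    intro p q
    simp only [List.foldl_cons]
    rw [naz_step_append (p ++ q) ng, naz_step_append q ng, List.append_assoc]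
    exact ih p _

lemma naz_loop_append (g : List (List (String × Option String))) (p : List String) :
    aNazLoop p g = p ++ aNazLoop [] g := by
  have := nazfold_append (pyGroupby pvKNaz g) p []
  simpa [aNazLoop] using this

lemma run_naz (h : List (List (String × Option String))) (t n : String)
    (ht : ∀ r ∈ h, pvKTip r = t) (hn : ∀ r ∈ h, pvKNaz r = n) :
    ∀ p s, List.foldl bStep (p, some t, some n, s) h =
      ((elemDedup (p, s) h).1, some t, some n, (elemDedup (p, s) h).2) := by
  induction h with
  | nil => intro p s; rfl
  | cons r rs ih =>
    intro p s
    have htr : pvKTip r = t := ht r (by simp)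
    have hnr : pvKNaz r = n := hn r (by simp)
    have ht2 : ∀ q ∈ rs, pvKTip q = t := fun q hq => ht q (by simp [hq])
    have hn2 : ∀ q ∈ rs, pvKNaz q = n := fun q hq => hn q (by simp [hq])
    have hstep : bStep (p, some t, some n, s) r =
        if resolve_regione r ∈ s then (p, some t, some n, s)
        else (p ++ [pvRegDiv (resolve_regione r)], some t, some n,
          PySem.Set.add s (resolve_regione r)) := by
      simp [bStep, htr, hnr]
    simp only [List.foldl_cons, hstep, elemDedup, List.foldl_cons]
    by_cases hr : resolve_regione r ∈ s
    · simp only [if_pos hr]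
      exact ih ht2 hn2 p s
    · simp only [if_neg hr]
      exact ih ht2 hn2 _ _

lemma naz_level (g : List (List (String × Option String))) (t : String)
    (ht : ∀ r ∈ g, pvKTip r = t) :
    ∀ p pn s, (∀ n h rest, pyGroupby pvKNaz g = (n, h) :: rest → pn ≠ some n) →
    ∃ pn' s', List.foldl bStep (p, some t, pn, s) g = (aNazLoop p g, some t, pn', s') := by
  induction g using pyGroupby.induct pvKNaz with
  | case1 =>
    intro p pn s _
    exact ⟨pn, s, by simp [aNazLoop, pyGroupby]⟩
  | case2 x xs ih =>
    intro p pn s hpn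
    have hrun : pyGroupby pvKNaz (x :: xs) =
        (pvKNaz x, x :: xs.takeWhile (fun y => pvKNaz y == pvKNaz x)) ::
          pyGroupby pvKNaz (xs.dropWhile (fun y => pvKNaz y == pvKNaz x)) := by
      rw [pyGroupby]
    have hpn2 : pn ≠ some (pvKNaz x) := hpn _ _ _ hrun
    have hx : bStep (p, some t, pn, s) x =
        bStep (p ++ [pvNazDiv (pvKNaz x)], some t, some (pvKNaz x), PySem.Set.ofList []) x := by
      simp [bStep, ht x (by simp), Ne.symm hpn2]
    have hsplit : x :: xs =
        (x :: xs.takeWhile (fun y => pvKNaz y == pvKNaz x)) ++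
          xs.dropWhile (fun y => pvKNaz y == pvKNaz x) := by
      simp [List.takeWhile_append_dropWhile]
    have htw_t : ∀ r ∈ x :: xs.takeWhile (fun y => pvKNaz y == pvKNaz x), pvKTip r = t := by
      intro r hr
      rcases List.mem_cons.mp hr with h | h
      · exact ht r (by simp [h])
      · exact ht r (List.mem_cons_of_mem _ ((List.takeWhile_sublist _).subset h))
    have htw_n : ∀ r ∈ x :: xs.takeWhile (fun y => pvKNaz y == pvKNaz x), pvKNaz r = pvKNaz x := by
      intro r hr
      rcases List.mem_cons.mp hr with h | h
      · rw [h]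
      · exact mem_takeWhile_key pvKNaz x xs r h
    have hdw_t : ∀ r ∈ xs.dropWhile (fun y => pvKNaz y == pvKNaz x), pvKTip r = t :=
      fun r hr => ht r (List.mem_cons_of_mem _ ((List.dropWhile_sublist _).subset hr))
    have hdw_pn : ∀ n h rest,
        pyGroupby pvKNaz (xs.dropWhile (fun y => pvKNaz y == pvKNaz x)) = (n, h) :: rest →
        some (pvKNaz x) ≠ some n := by
      intro n h rest hg
      rcases hdw : xs.dropWhile (fun y => pvKNaz y == pvKNaz x) with _ | ⟨y, ys⟩
      · rw [hdw] at hg; rw [pyGroupby] at hg; exact absurd hg (by simp)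
      · rw [hdw] at hg; rw [pyGroupby] at hg
        injection hg with h1 _
        have hy : pvKNaz y ≠ pvKNaz x := dropWhile_key_head pvKNaz x y xs ys hdw
        have : n = pvKNaz y := by
          have := congrArg Prod.fst h1
          simpa using this.symm
        simp [this]
        exact fun e => hy e.symm
    -- left side
    have hL : List.foldl bStep (p, some t, pn, s) (x :: xs) =
        List.foldl bStep
          ((elemDedup (p ++ [pvNazDiv (pvKNaz x)], PySem.Set.ofList [])
              (x :: xs.takeWhile (fun y => pvKNaz y == pvKNaz x))).1, some t, some (pvKNaz x),
            (elemDedup (p ++ [pvNazDiv (pvKNaz x)], PySem.Set.ofList [])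
              (x :: xs.takeWhile (fun y => pvKNaz y == pvKNaz x))).2)
          (xs.dropWhile (fun y => pvKNaz y == pvKNaz x)) := by
      conv_lhs => rw [hsplit]
      rw [List.foldl_append, List.foldl_cons, hx, ← List.foldl_cons,
        run_naz _ t (pvKNaz x) htw_t htw_n]
    obtain ⟨pn', s', hrest⟩ := ih hdw_t _ (some (pvKNaz x)) _ hdw_pn
    rw [hL, hrest]
    refine ⟨pn', s', ?_⟩
    -- right side
    have hR : aNazLoop p (x :: xs) =
        aNazLoop ((elemDedup (p ++ [pvNazDiv (pvKNaz x)], PySem.Set.ofList [])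
            (x :: xs.takeWhile (fun y => pvKNaz y == pvKNaz x))).1)
          (xs.dropWhile (fun y => pvKNaz y == pvKNaz x)) := by
      show ((pyGroupby pvKNaz (x :: xs)).foldl _ p) = _
      rw [hrun, List.foldl_cons, reg_loop_eq]
      rfl
    rw [hR]

lemma tip_level (rows : List (List (String × Option String))) :
    ∀ p pt pn s, (∀ t g rest, pyGroupby pvKTip rows = (t, g) :: rest → pt ≠ some t) →
    ∃ pt' pn' s', List.foldl bStep (p, pt, pn, s) rows =
      (p ++ tipRunsParts pt (pyGroupby pvKTip rows), pt', pn', s') := by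
  induction rows using pyGroupby.induct pvKTip with
  | case1 =>
    intro p pt pn s _
    exact ⟨pt, pn, s, by rw [pyGroupby]; simp [tipRunsParts]⟩
  | case2 x xs ih =>
    intro p pt pn s hpt
    have hrun : pyGroupby pvKTip (x :: xs) =
        (pvKTip x, x :: xs.takeWhile (fun y => pvKTip y == pvKTip x)) ::
          pyGroupby pvKTip (xs.dropWhile (fun y => pvKTip y == pvKTip x)) := by
      rw [pyGroupby]
    have hpt2 : pt ≠ some (pvKTip x) := hpt _ _ _ hrun
    have hx : bStep (p, pt, pn, s) x =
        bStep ((if pt = none then p else p ++ [pvSpacer]) ++ [pvTipDiv (pvKTip x)],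
          some (pvKTip x), none, s) x := by
      simp [bStep, Ne.symm hpt2]
    have hsplit : x :: xs =
        (x :: xs.takeWhile (fun y => pvKTip y == pvKTip x)) ++
          xs.dropWhile (fun y => pvKTip y == pvKTip x) := by
      simp [List.takeWhile_append_dropWhile]
    have htw_t : ∀ r ∈ x :: xs.takeWhile (fun y => pvKTip y == pvKTip x), pvKTip r = pvKTip x := by
      intro r hr
      rcases List.mem_cons.mp hr with h | h
      · rw [h]
      · exact mem_takeWhile_key pvKTip x xs r h
    obtain ⟨pn1, s1, hgrp⟩ :=
      naz_level (x :: xs.takeWhile (fun y => pvKTip y == pvKTip x)) (pvKTip x) htw_t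
        ((if pt = none then p else p ++ [pvSpacer]) ++ [pvTipDiv (pvKTip x)]) none s
        (fun n h rest _ => by simp)
    have hL : List.foldl bStep (p, pt, pn, s) (x :: xs) =
        List.foldl bStep
          (aNazLoop ((if pt = none then p else p ++ [pvSpacer]) ++ [pvTipDiv (pvKTip x)])
              (x :: xs.takeWhile (fun y => pvKTip y == pvKTip x)), some (pvKTip x), pn1, s1)
          (xs.dropWhile (fun y => pvKTip y == pvKTip x)) := by
      conv_lhs => rw [hsplit]
      rw [List.foldl_append, List.foldl_cons, hx, ← List.foldl_cons, hgrp]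
    have hdw_pt : ∀ t' g rest,
        pyGroupby pvKTip (xs.dropWhile (fun y => pvKTip y == pvKTip x)) = (t', g) :: rest →
        some (pvKTip x) ≠ some t' := by
      intro t' g rest hg
      rcases hdw : xs.dropWhile (fun y => pvKTip y == pvKTip x) with _ | ⟨y, ys⟩
      · rw [hdw] at hg; rw [pyGroupby] at hg; exact absurd hg (by simp)
      · rw [hdw] at hg; rw [pyGroupby] at hg
        injection hg with h1 _
        have hy : pvKTip y ≠ pvKTip x := dropWhile_key_head pvKTip x y xs ys hdw
        have : t' = pvKTip y := by
          have := congrArg Prod.fst h1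
          simpa using this.symm
        simp [this]
        exact fun e => hy e.symm
    obtain ⟨pt', pn', s', hrest⟩ := ih _ (some (pvKTip x)) pn1 s1 hdw_pt
    refine ⟨pt', pn', s', ?_⟩
    rw [hL, hrest, hrun]
    have hsp : (if pt = none then p else p ++ [pvSpacer]) =
        p ++ (if pt = none then [] else [pvSpacer]) := by
      cases pt <;> simp
    rw [naz_loop_append, tipRunsParts, hsp]
    simp [List.append_assoc]

lemma a_fold_eq (runs : List (String × List (List (String × Option String)))) :
    ∀ acc, runs.foldl (fun acc tg => aNazLoop (acc ++ [pvTipDiv tg.1]) tg.2 ++ [pvSpacer]) acc =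
      acc ++ runs.flatMap (fun tg => pvTipDiv tg.1 :: aNazLoop [] tg.2 ++ [pvSpacer]) := by
  induction runs with
  | nil => intro acc; simp
  | cons tg rest ih =>
    intro acc
    simp only [List.foldl_cons, List.flatMap_cons]
    rw [naz_loop_append, ih]
    simp

lemma tipRunsParts_spacer (runs : List (String × List (List (String × Option String))))
    (hne : runs ≠ []) : ∀ pt,
    tipRunsParts pt runs ++ [pvSpacer] =
      (if pt = none then [] else [pvSpacer]) ++
        runs.flatMap (fun tg => pvTipDiv tg.1 :: aNazLoop [] tg.2 ++ [pvSpacer]) := by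
  induction runs with
  | nil => exact absurd rfl hne
  | cons tg rest ih =>
    intro pt
    obtain ⟨t, g⟩ := tg
    rcases rest with _ | ⟨tg2, rest2⟩
    · simp [tipRunsParts]
    · rw [tipRunsParts]
      rw [List.append_assoc, ih (by simp) (some t)]
      simp

-- ===== VERDICT (by name: the statement is the Claim_ definition above) =====
theorem build_carta_toc_html_spec : Claim_equal_build_carta_toc_html := by
  intro rows _ _
  unfold Spec_build_carta_toc_html build_carta_toc_html build_carta_toc_html_alt
  rcases rows with _ | ⟨x, xs⟩
  · rfl
  · simp only [reduceCtorEq, if_false]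
    obtain ⟨pt', pn', s', hB⟩ :=
      tip_level (x :: xs) pvHeader none none (PySem.Set.ofList [])
        (fun t g rest _ => by simp)
    rw [a_fold_eq, hB]
    have hne : pyGroupby pvKTip (x :: xs) ≠ [] := by rw [pyGroupby]; simp
    congr 1
    have h2 : tipRunsParts none (pyGroupby pvKTip (x :: xs)) ++ [pvSpacer] =
        List.flatMap (fun tg => pvTipDiv tg.1 :: aNazLoop [] tg.2 ++ [pvSpacer])
          (pyGroupby pvKTip (x :: xs)) := by
      simpa using tipRunsParts_spacer _ hne none
    rw [← h2]
    simp [List.append_assoc]
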